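-- pv_equiv track=rewrite | github.com/HrishithBhat/Virtual-Garden-Planner | backend/services/plant_ai_helper.py | _sanitize_conversation
-- ===== SOURCE A (Python) =====
-- from typing import Any, Dict, List, Optional, Sequence
--
-- def _sanitize_conversation(conversation: Sequence[Dict[str, str]]) -> List[Dict[str, str]]:
--     sanitized: List[Dict[str, str]] = []
--     for entry in conversation or []:
--         role = (entry.get("role") or "user").strip().lower()
--         if role not in {"user", "assistant"}:
--             role = "user"
--         content = (entry.get("content") or "").strip()
--         if not content:
--             continue
--         sanitized.append({"role": role, "content": content})
--     return sanitized[-12:]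
-- ===== SOURCE B (Python) =====
-- from typing import Any, Dict, List, Optional, Sequence
--
--
-- def _normalize_entry(entry: Dict[str, str]) -> Optional[Dict[str, str]]:
--     content = (entry.get("content") or "").strip()
--     if not content:
--         return None
--     role = (entry.get("role") or "user").strip().lower()
--     return {"role": role if role in ("user", "assistant") else "user",
--             "content": content}
--
--
-- def _sanitize_conversation(conversation: Sequence[Dict[str, str]]) -> List[Dict[str, str]]:
--     buf: List[Dict[str, str]] = []
--     for entry in reversed(conversation or []):
--         row = _normalize_entry(entry)
--         if row is None:
--             continue
--         buf.append(row)
--         if len(buf) == 12: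
--             break
--     buf.reverse()
--     return buf
-- ===== Notes on version B (the rewrite author's own statement) =====
-- stated objective: alternative
-- what changed: B replaces A's full forward pass plus [-12:] slice with a helper-based normalization and a bounded backward scan that breaks as soon as 12 valid rows are collected, then reverses the buffer back to chronological order.
import Mathlib
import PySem

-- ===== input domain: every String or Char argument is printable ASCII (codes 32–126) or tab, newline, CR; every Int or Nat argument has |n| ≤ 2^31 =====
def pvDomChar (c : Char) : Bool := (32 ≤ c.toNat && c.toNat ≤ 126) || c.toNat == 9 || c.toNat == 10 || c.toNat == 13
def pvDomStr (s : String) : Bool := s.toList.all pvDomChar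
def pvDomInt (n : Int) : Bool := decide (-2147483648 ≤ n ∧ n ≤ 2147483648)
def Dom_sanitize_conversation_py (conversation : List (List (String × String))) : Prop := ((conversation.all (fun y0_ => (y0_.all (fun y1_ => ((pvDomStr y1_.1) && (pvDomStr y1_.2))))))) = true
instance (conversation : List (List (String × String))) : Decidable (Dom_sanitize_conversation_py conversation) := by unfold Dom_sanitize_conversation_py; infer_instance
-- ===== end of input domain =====

-- B normalizes each entry via a helper and scans backwards, breaking once 12 valid rows
-- are collected, instead of A's full forward pass followed by a [-12:] slice (objective: alternative).

-- ===== PORT A =====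
-- A's loop body: normalize role/content inline, append the row unless content is empty.
def pvStepA (acc : List (List (String × String))) (entry : List (String × String)) :
    List (List (String × String)) :=
  let role0 := match (PySem.Dict.mk entry).get? "role" with
    | some s => if s = "" then "user" else s
    | none => "user"
  let role1 := PySem.Str.lower (PySem.Str.strip role0)
  let role := if role1 = "user" ∨ role1 = "assistant" then role1 else "user"
  let content := PySem.Str.strip (match (PySem.Dict.mk entry).get? "content" with
    | some s => s
    | none => "")
  if content = "" then acc else acc ++ [[("role", role), ("content", content)]]

def sanitize_conversation_py (conversation : List (List (String × String))) :
    List (List (String × String)) :=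
  let sanitized := conversation.foldl pvStepA []
  PySem.List.slice sanitized (some (-12)) none

-- ===== PORT B =====
-- _normalize_entry: content first with early return; role via a conditional expression.
def pvNormalize (entry : List (String × String)) : Option (List (String × String)) :=
  let content := PySem.Str.strip (match (PySem.Dict.mk entry).get? "content" with
    | some s => s
    | none => "")
  if content = "" then none
  else
    let role := PySem.Str.lower (PySem.Str.strip (match (PySem.Dict.mk entry).get? "role" with
      | some s => if s = "" then "user" else s
      | none => "user"))
    some [("role", if role = "user" ∨ role = "assistant" then role else "user"),
          ("content", content)]

-- the backward scan with early break at 12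
def pvCollect : List (List (String × String)) → List (List (String × String)) →
    List (List (String × String))
  | [], buf => buf
  | e :: rest, buf =>
    match pvNormalize e with
    | none => pvCollect rest buf
    | some row =>
      let buf' := buf ++ [row]
      if buf'.length = 12 then buf' else pvCollect rest buf'

def sanitize_conversation_py_alt (conversation : List (List (String × String))) :
    List (List (String × String)) :=
  (pvCollect conversation.reverse []).reverse

-- ===== PRECONDITION & SPEC =====
def Spec_sanitize_conversation_py (conversation : List (List (String × String))) (out : List (List (String × String))) : Prop := out = sanitize_conversation_py_alt conversation
instance (conversation : List (List (String × String))) (out : List (List (String × String))) : Decidable (Spec_sanitize_conversation_py conversation out) := by unfold Spec_sanitize_conversation_py; infer_instance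

-- ===== CLAIM (what is proved, stated in full; the proofs are below) =====
def Claim_equal_sanitize_conversation_py : Prop := ∀ (conversation : List (List (String × String))), Dom_sanitize_conversation_py conversation → Spec_sanitize_conversation_py conversation (sanitize_conversation_py conversation)

-- ===== LEMMAS AND PROOFS =====

theorem pvStepA_eq (acc : List (List (String × String))) (e : List (String × String)) :
    pvStepA acc e = acc ++ (pvNormalize e).toList := by
  unfold pvStepA pvNormalize
  repeat' split
  all_goals (dsimp only []; split <;> simp_all)

theorem foldl_pvStepA (l : List (List (String × String)))
    (acc : List (List (String × String))) :
    l.foldl pvStepA acc = acc ++ l.filterMap pvNormalize := by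
  induction l generalizing acc with
  | nil => simp
  | cons e rest ih =>
    simp only [List.foldl_cons, List.filterMap_cons, pvStepA_eq]
    cases h : pvNormalize e <;> simp [ih]

theorem pvCollect_eq (l buf : List (List (String × String))) (h : buf.length < 12) :
    pvCollect l buf = (buf ++ l.filterMap pvNormalize).take 12 := by
  induction l generalizing buf with
  | nil => simp [pvCollect, List.take_of_length_le (Nat.le_of_lt h)]
  | cons e rest ih =>
    unfold pvCollect
    rw [List.filterMap_cons]
    cases hn : pvNormalize e with
    | none => simpa only [hn] using ih buf h
    | some row =>
      by_cases h12 : (buf ++ [row]).length = 12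
      · simp only [h12, if_true]
        rw [show buf ++ row :: rest.filterMap pvNormalize
              = (buf ++ [row]) ++ rest.filterMap pvNormalize by simp,
            List.take_append_of_le_length (by omega), List.take_of_length_le (by omega)]
      · have hlt : (buf ++ [row]).length < 12 := by simp at h12 ⊢; omega
        simp only [h12, if_false]
        rw [ih _ hlt]
        simp

theorem reverse_take_reverse (xs : List (List (String × String))) (n : Nat) :
    (xs.reverse.take n).reverse = xs.drop (xs.length - n) := by
  rw [List.take_reverse]
  simp

-- ===== VERDICT (by name: the statement is the Claim_ definition above) =====
theorem sanitize_conversation_py_spec : Claim_equal_sanitize_conversation_py := by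
  intro conv _
  show sanitize_conversation_py conv = sanitize_conversation_py_alt conv
  unfold sanitize_conversation_py sanitize_conversation_py_alt
  rw [foldl_pvStepA, pvCollect_eq _ _ (by simp)]
  rw [PySem.List.slice_from_neg_ofNat _ 12 (by omega)]
  simp only [List.nil_append]
  rw [List.filterMap_reverse, reverse_take_reverse]
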